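-- pv_equiv track=rewrite | github.com/rasendubi/oleksii.shmalko.com | recalculate-unicode-range.py | unicode_ranges
-- ===== SOURCE A (Python) =====
-- def unicode_ranges(char_set):
--     codepoints = sorted(ord(c) for c in char_set)
--     ranges = []
--     start = end = codepoints[0]
--
--     for cp in codepoints[1:]:
--         if cp == end + 1:
--             end = cp
--         else:
--             ranges.append((start, end))
--             start = end = cp
--     ranges.append((start, end))
--     return ranges
-- ===== SOURCE B (Python) =====
-- def unicode_ranges(char_set):
--     out = []
--     for cp in reversed(sorted(ord(c) for c in char_set)):
--         if out and out[0][0] == cp + 1: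
--             out[0] = (cp, out[0][1])
--         else:
--             out.insert(0, (cp, cp))
--     return out
-- ===== Notes on version B (the rewrite author's own statement) =====
-- stated objective: alternative
-- what changed: Replaces the start/end state machine with a trailing append by a reverse traversal of the sorted codepoints that merges each codepoint into the head range of the result, so no run state or final flush is needed.
import Mathlib
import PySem

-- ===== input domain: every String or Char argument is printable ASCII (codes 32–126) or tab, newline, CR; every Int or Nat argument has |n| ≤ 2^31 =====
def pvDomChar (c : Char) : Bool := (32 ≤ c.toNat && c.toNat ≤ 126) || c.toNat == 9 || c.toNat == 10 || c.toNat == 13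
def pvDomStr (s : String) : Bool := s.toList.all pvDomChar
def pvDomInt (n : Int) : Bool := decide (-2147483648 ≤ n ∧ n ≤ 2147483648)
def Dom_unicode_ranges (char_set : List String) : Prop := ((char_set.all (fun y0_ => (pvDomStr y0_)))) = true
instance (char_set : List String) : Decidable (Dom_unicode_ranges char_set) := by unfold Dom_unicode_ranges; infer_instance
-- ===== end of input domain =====

-- B replaces A's start/end run-state loop (with a final flush append) by a reverse
-- traversal of the sorted codepoints that merges each codepoint into the head range of
-- the result; A and B agree on every nonempty list of length-1 strings.

-- ===== PORT A =====
-- ord(c) for a one-character string (exact when s has exactly one character; Pre_ ensures this)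
def pvOrd (s : String) : Int :=
  match s.toList with
  | [c] => (c.toNat : Int)
  | _ => 0

-- the 'for cp in codepoints[1:]' loop carrying (ranges, start, end), plus the final append
def uraLoop (ranges : List (Int × Int)) (start e : Int) : List Int → List (Int × Int)
  | [] => ranges ++ [(start, e)]
  | cp :: rest =>
    if cp = e + 1 then uraLoop ranges start cp rest
    else uraLoop (ranges ++ [(start, e)]) cp cp rest

def unicode_ranges (char_set : List String) : List (Int × Int) :=
  let codepoints := PySem.List.sorted (char_set.map pvOrd) id false
  match codepoints with
  | [] => []   -- unreachable under Pre_ (Python raises IndexError on codepoints[0])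
  | c0 :: rest => uraLoop [] c0 c0 rest

-- ===== PORT B =====
-- one step of B's loop body: merge cp into the head range of out, or prepend a singleton
def urbMerge (cp : Int) (out : List (Int × Int)) : List (Int × Int) :=
  match out with
  | (a, b) :: t => if a = cp + 1 then (cp, b) :: t else (cp, cp) :: (a, b) :: t
  | [] => [(cp, cp)]

def unicode_ranges_alt (char_set : List String) : List (Int × Int) :=
  (PySem.List.sorted (char_set.map pvOrd) id false).reverse.foldl
    (fun out cp => urbMerge cp out) []

-- ===== PRECONDITION & SPEC =====
-- Pre_ excludes the empty list (A raises IndexError on codepoints[0]) and any string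
-- that is not exactly one character (ord raises TypeError in both A and B).
def Pre_unicode_ranges (char_set : List String) : Prop :=
  char_set ≠ [] ∧ ∀ s ∈ char_set, s.toList.length = 1
instance (char_set : List String) : Decidable (Pre_unicode_ranges char_set) := by
  unfold Pre_unicode_ranges; infer_instance

def pvWitness_unicode_ranges : List String := ["a", "c", "b", "%"]


def Spec_unicode_ranges (char_set : List String) (out : List (Int × Int)) : Prop := out = unicode_ranges_alt char_set
instance (char_set : List String) (out : List (Int × Int)) : Decidable (Spec_unicode_ranges char_set out) := by unfold Spec_unicode_ranges; infer_instance

-- ===== CLAIM (what is proved, stated in full; the proofs are below) =====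
def Claim_equal_unicode_ranges : Prop := ∀ (char_set : List String), Dom_unicode_ranges char_set → Pre_unicode_ranges char_set → Spec_unicode_ranges char_set (unicode_ranges char_set)

-- ===== LEMMAS AND PROOFS =====

-- ===== VERDICT (by name: the statement is the Claim_ definition above) =====
-- direct (accumulator-free) form of A's loop
def uraGo (start e : Int) : List Int → List (Int × Int)
  | [] => [(start, e)]
  | cp :: rest =>
    if cp = e + 1 then uraGo start cp rest
    else (start, e) :: uraGo cp cp rest

-- B's fold written as a foldr over the ascending list
def urbF (l : List Int) : List (Int × Int) := l.foldr urbMerge []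

lemma uraLoop_eq_go (ranges : List (Int × Int)) (start e : Int) (l : List Int) :
    uraLoop ranges start e l = ranges ++ uraGo start e l := by
  induction l generalizing ranges start e with
  | nil => simp [uraLoop, uraGo]
  | cons cp rest ih =>
    simp only [uraLoop, uraGo]
    split_ifs with h
    · exact ih ranges start cp
    · rw [ih (ranges ++ [(start, e)]) cp cp, List.append_assoc]; rfl

lemma urbF_head (c : Int) (t : List Int) :
    ∃ b u, urbF (c :: t) = (c, b) :: u := by
  induction t generalizing c with
  | nil => exact ⟨c, [], rfl⟩
  | cons d t' ih =>
    obtain ⟨b, u, hb⟩ := ih d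
    simp only [urbF, List.foldr] at hb ⊢
    rw [hb]
    by_cases h : d = c + 1
    · exact ⟨b, u, by simp [urbMerge, h]⟩
    · exact ⟨c, (d, b) :: u, by simp [urbMerge, h]⟩

lemma uraGo_eq_urbF (start e : Int) (rest : List Int) :
    uraGo start e rest =
      match urbF (e :: rest) with
      | (_, b) :: t => (start, b) :: t
      | [] => [] := by
  induction rest generalizing start e with
  | nil => simp [uraGo, urbF, urbMerge]
  | cons cp more ih =>
    obtain ⟨b, u, hb⟩ := urbF_head cp more
    simp only [uraGo]
    split_ifs with h
    · rw [ih start cp]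
      have : urbF (e :: cp :: more) = (e, b) :: u := by
        simp only [urbF, List.foldr] at hb ⊢
        rw [hb, urbMerge, if_pos h]
      rw [this, hb]
    · rw [ih cp cp]
      have : urbF (e :: cp :: more) = (e, e) :: (cp, b) :: u := by
        simp only [urbF, List.foldr] at hb ⊢
        rw [hb, urbMerge, if_neg h]
      rw [this, hb]

theorem unicode_ranges_spec : Claim_equal_unicode_ranges := by
  intro char_set _ hpre
  unfold Spec_unicode_ranges unicode_ranges unicode_ranges_alt
  rw [List.foldl_reverse]
  show _ = urbF (PySem.List.sorted (char_set.map pvOrd) id false)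
  cases hs : PySem.List.sorted (char_set.map pvOrd) id false with
  | nil =>
    exfalso
    have := PySem.List.sorted_perm (xs := char_set.map pvOrd) (key := id) (rev := false)
    rw [hs] at this
    have := this.symm.eq_nil
    simp at this
    exact hpre.1 this
  | cons c0 rest =>
    show uraLoop [] c0 c0 rest = urbF (c0 :: rest)
    rw [uraLoop_eq_go, List.nil_append, uraGo_eq_urbF]
    obtain ⟨b, u, hb⟩ := urbF_head c0 rest
    rw [hb]
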